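-- pv_equiv track=rewrite | github.com/prunier/changes | wiki.py | print_data_table
-- ===== SOURCE A (Python) =====
-- def print_data_table(data_list, row_names,flag_add_line=True):
--     # Print header
--     text = "\n{background:gold}. |_. " + " |_. ".join(row_names) + "|\n" if row_names else ""
--     width_table = str(len(row_names))
--
--     # Print data rows
--     previous_cell_col1 = ""
--     for i, row in enumerate(data_list):
--         if flag_add_line and i > 0 and row[0] != previous_cell_col1:
--             text += "|\\" + width_table + "{background:lightgrey}. |\n"
--         previous_cell_col1 = row[0]
--         text += f"| " + " |".join(str(cell) for cell in row) + "|\n"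
--
--     return text
-- ===== SOURCE B (Python) =====
-- def _fmt_row(row):
--     return "| " + " |".join(str(cell) for cell in row) + "|\n"
--
--
-- def _split_run(rows, key):
--     # longest prefix of rows whose first cell equals key, and the remainder
--     if rows and rows[0][0] == key:
--         run, rest = _split_run(rows[1:], key)
--         return [rows[0]] + run, rest
--     return [], rows
--
--
-- def _render(rows, sep):
--     # rows is nonempty: render the leading run, then the rest separated by sep
--     run, rest = _split_run(rows[1:], rows[0][0])
--     chunk = _fmt_row(rows[0]) + "".join(_fmt_row(r) for r in run)
--     if not rest:
--         return chunk
--     return chunk + sep + _render(rest, sep)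
--
--
-- def print_data_table(data_list, row_names, flag_add_line=True):
--     header = "\n{background:gold}. |_. " + " |_. ".join(row_names) + "|\n" if row_names else ""
--     sep = ("|\\" + str(len(row_names)) + "{background:lightgrey}. |\n") if flag_add_line else ""
--     return header + (_render(data_list, sep) if data_list else "")
-- ===== Notes on version B (the rewrite author's own statement) =====
-- stated objective: alternative
-- what changed: A threads a previous-first-cell state through one indexed loop, deciding before each row whether to emit a separator; B recursively splits the data into maximal runs of consecutive rows with equal first cell and renders the runs joined by the separator (empty when flag_add_line is false).
import Mathlib
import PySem

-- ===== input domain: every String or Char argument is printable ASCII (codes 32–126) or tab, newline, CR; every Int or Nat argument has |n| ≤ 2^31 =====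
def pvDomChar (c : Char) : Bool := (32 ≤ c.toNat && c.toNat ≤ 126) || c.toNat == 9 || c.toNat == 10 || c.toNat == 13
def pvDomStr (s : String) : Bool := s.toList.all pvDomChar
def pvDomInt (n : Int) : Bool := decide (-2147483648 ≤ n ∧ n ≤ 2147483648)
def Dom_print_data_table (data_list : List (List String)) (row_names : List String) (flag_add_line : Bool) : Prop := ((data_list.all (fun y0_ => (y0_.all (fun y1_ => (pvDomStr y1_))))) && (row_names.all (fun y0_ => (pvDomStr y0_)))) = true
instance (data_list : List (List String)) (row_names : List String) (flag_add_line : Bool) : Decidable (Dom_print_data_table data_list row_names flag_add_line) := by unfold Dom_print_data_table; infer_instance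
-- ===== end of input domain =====

-- B replaces A's indexed loop with a stateful previous-first-cell comparison by a
-- recursive split into runs of equal first cells joined by the separator (objective: alternative decomposition).

-- ===== PORT A =====
-- the for-loop of A: state = (i, previous_cell_col1, text), one recursive step per row
def pvALoop (flag : Bool) (width : String) (rows : List (List String)) (i : Nat) (prev : String) (text : String) : String :=
  match rows with
  | [] => text
  | row :: rest =>
    let text := if flag && decide (i > 0) && decide (row.head?.getD "" ≠ prev) then
        text ++ "|\\" ++ width ++ "{background:lightgrey}. |\n" else text
    -- row[0] : Pre_ guarantees rows are nonempty, so head?.getD "" is exact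
    pvALoop flag width rest (i + 1) (row.head?.getD "") (text ++ "| " ++ PySem.Str.join " |" row ++ "|\n")

def print_data_table (data_list : List (List String)) (row_names : List String) (flag_add_line : Bool) : String :=
  let text := if row_names ≠ [] then "\n{background:gold}. |_. " ++ PySem.Str.join " |_. " row_names ++ "|\n" else ""
  let width_table := PySem.Int.toStr (row_names.length : Int)
  pvALoop flag_add_line width_table data_list 0 "" text

-- ===== PORT B =====
def pvFmtRow (row : List String) : String :=
  "| " ++ PySem.Str.join " |" row ++ "|\n"

-- _split_run: longest prefix of rows whose first cell equals key, and the remainder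
def pvSplitRun (rows : List (List String)) (key : String) : List (List String) × List (List String) :=
  match rows with
  | [] => ([], [])
  | r :: rest =>
    if r.head?.getD "" = key then
      let p := pvSplitRun rest key
      (r :: p.1, p.2)
    else ([], r :: rest)

-- needed by pvRender's termination
theorem pvSplitRun_snd_length_le (rows : List (List String)) (key : String) :
    (pvSplitRun rows key).2.length ≤ rows.length := by
  induction rows with
  | nil => simp [pvSplitRun]
  | cons r rest ih =>
    simp only [pvSplitRun]
    split
    · exact Nat.le_succ_of_le ih
    · exact Nat.le_refl _

-- _render: leading run rendered as a chunk, then sep and the rest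
def pvRender (rows : List (List String)) (sep : String) : String :=
  match rows with
  | [] => ""  -- unreachable: _render is only called on nonempty lists
  | r :: rest =>
    let p := pvSplitRun rest (r.head?.getD "")
    let chunk := pvFmtRow r ++ String.join (p.1.map pvFmtRow)
    if p.2 = [] then chunk else chunk ++ sep ++ pvRender p.2 sep
termination_by rows.length
decreasing_by
  exact Nat.lt_succ_of_le (pvSplitRun_snd_length_le rest (r.head?.getD ""))

def print_data_table_alt (data_list : List (List String)) (row_names : List String) (flag_add_line : Bool) : String :=
  let header := if row_names ≠ [] then "\n{background:gold}. |_. " ++ PySem.Str.join " |_. " row_names ++ "|\n" else ""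
  let sep := if flag_add_line then "|\\" ++ PySem.Int.toStr (row_names.length : Int) ++ "{background:lightgrey}. |\n" else ""
  header ++ (if data_list ≠ [] then pvRender data_list sep else "")

-- ===== PRECONDITION & SPEC =====
-- Pre_ excludes data lists containing an empty row: on those A raises IndexError at row[0].
def Pre_print_data_table (data_list : List (List String)) (row_names : List String) (flag_add_line : Bool) : Prop :=
  ∀ row ∈ data_list, row ≠ []
instance (data_list : List (List String)) (row_names : List String) (flag_add_line : Bool) : Decidable (Pre_print_data_table data_list row_names flag_add_line) := by unfold Pre_print_data_table; infer_instance

def pvWitness_print_data_table : List (List String) × List String × Bool :=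
  ([["a", "1"], ["a", "2"], ["b", "3"]], ["k", "v"], true)

def Spec_print_data_table (data_list : List (List String)) (row_names : List String) (flag_add_line : Bool) (out : String) : Prop := out = print_data_table_alt data_list row_names flag_add_line
instance (data_list : List (List String)) (row_names : List String) (flag_add_line : Bool) (out : String) : Decidable (Spec_print_data_table data_list row_names flag_add_line out) := by unfold Spec_print_data_table; infer_instance

-- ===== CLAIM (what is proved, stated in full; the proofs are below) =====
def Claim_equal_print_data_table : Prop := ∀ (data_list : List (List String)) (row_names : List String) (flag_add_line : Bool), Dom_print_data_table data_list row_names flag_add_line → Pre_print_data_table data_list row_names flag_add_line → Spec_print_data_table data_list row_names flag_add_line (print_data_table data_list row_names flag_add_line)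

-- ===== LEMMAS AND PROOFS =====

-- characterisation of A's loop from position ≥ 1: sep (or nothing) before each row whose
-- first cell differs from the previous row's first cell
def pvG (sep : String) (rows : List (List String)) (prev : String) : String :=
  match rows with
  | [] => ""
  | r :: rest => (if r.head?.getD "" ≠ prev then sep else "") ++ pvFmtRow r ++ pvG sep rest (r.head?.getD "")

theorem pvALoop_eq_pvG (flag : Bool) (width : String) (rows : List (List String)) :
    ∀ (i : Nat), 0 < i → ∀ (prev text : String),
      pvALoop flag width rows i prev text
        = text ++ pvG (if flag then "|\\" ++ width ++ "{background:lightgrey}. |\n" else "") rows prev := by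
  induction rows with
  | nil => intro i hi prev text; simp [pvALoop, pvG]
  | cons r rest ih =>
    intro i hi prev text
    rw [pvALoop, ih (i + 1) (Nat.succ_pos i)]
    cases flag
    · simp [pvG, pvFmtRow, String.append_assoc]
    · by_cases h : r.head?.getD "" = prev
      · simp [pvG, pvFmtRow, h, hi, String.append_assoc, String.append_empty]
      · rw [if_pos (show (true && decide (i > 0) && decide (¬r.head?.getD "" = prev)) = true by
            simp [hi, h]), pvG, if_pos (show r.head?.getD "" ≠ prev from h), if_pos rfl]
        simp only [pvFmtRow, String.append_assoc]

theorem pvG_eq_split (sep : String) :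
    ∀ (n : Nat) (rows : List (List String)), rows.length ≤ n → ∀ (key : String),
      pvG sep rows key
        = String.join ((pvSplitRun rows key).1.map pvFmtRow)
          ++ (if (pvSplitRun rows key).2 = [] then ""
              else sep ++ pvRender (pvSplitRun rows key).2 sep) := by
  intro n
  induction n with
  | zero =>
    intro rows hlen key
    have hnil : rows = [] := List.eq_nil_of_length_eq_zero (Nat.le_zero.mp hlen)
    subst hnil
    simp [pvG, pvSplitRun, String.join]
  | succ n ih =>
    intro rows hlen key
    cases rows with
    | nil => simp [pvG, pvSplitRun, String.join]
    | cons r rest =>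
      by_cases h : r.head?.getD "" = key
      · -- r belongs to the current run
        have hsplit : pvSplitRun (r :: rest) key = (r :: (pvSplitRun rest key).1, (pvSplitRun rest key).2) := by
          simp [pvSplitRun, h]
        rw [pvG, h, hsplit, ih rest (Nat.le_of_succ_le_succ hlen) key]
        simp [String.join_eq, String.append_assoc, String.empty_append]
      · -- r starts a new group
        have hsplit : pvSplitRun (r :: rest) key = ([], r :: rest) := by
          simp [pvSplitRun, h]
        have hr : pvRender (r :: rest) sep = pvFmtRow r ++ pvG sep rest (r.head?.getD "") := by
          rw [pvRender, ih rest (Nat.le_of_succ_le_succ hlen) (r.head?.getD "")]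
          split <;> simp_all [String.append_assoc, String.append_empty]
        rw [pvG, hsplit, hr]
        simp [h, String.join, String.append_assoc]

theorem pvRender_eq (rows : List (List String)) (r : List String) (sep : String) :
    pvRender (r :: rows) sep = pvFmtRow r ++ pvG sep rows (r.head?.getD "") := by
  rw [pvG_eq_split sep rows.length rows (Nat.le_refl _) (r.head?.getD ""), pvRender]
  split <;> simp_all [String.append_assoc, String.append_empty]

-- ===== VERDICT (by name: the statement is the Claim_ definition above) =====
theorem print_data_table_spec : Claim_equal_print_data_table := by
  intro data_list row_names flag_add_line _ _
  unfold Spec_print_data_table print_data_table print_data_table_alt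
  cases data_list with
  | nil => simp [pvALoop]
  | cons r rest =>
    rw [pvALoop]
    simp only [gt_iff_lt, Nat.lt_irrefl, decide_false, Bool.and_false, Bool.false_and,
      if_false, Bool.false_eq_true]
    rw [pvALoop_eq_pvG flag_add_line _ rest (0 + 1) Nat.one_pos, pvRender_eq]
    simp [pvFmtRow, String.append_assoc]
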